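-- pv_equiv track=rewrite | github.com/tsumit00123/Weekly-Assignment | 4th week/2.Q_N_2.py | is_upper_lower
-- ===== SOURCE A (Python) =====
-- def is_upper_lower(string):
--     lower_case=0
--     upper_case=0
--
--     for i in string:
--         if 'A'<=i<='Z':
--             upper_case+=1
--         elif 'a'<=i<='z':
--             lower_case+=1
--
--     return upper_case,lower_case
-- ===== SOURCE B (Python) =====
-- def is_upper_lower(string):
--     # Build a character frequency table in one pass, then sum the counts
--     # of keys in each ASCII letter range.
--     freq = {}
--     for ch in string:
--         freq[ch] = freq.get(ch, 0) + 1
--     upper_case = sum(v for k, v in freq.items() if 'A' <= k <= 'Z')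
--     lower_case = sum(v for k, v in freq.items() if 'a' <= k <= 'z')
--     return upper_case, lower_case
-- ===== Notes on version B (the rewrite author's own statement) =====
-- stated objective: alternative
-- what changed: B first builds a character-frequency dictionary of the string in one pass and then sums the per-character counts whose key lies in the uppercase (resp. lowercase) ASCII letter range, instead of A's single fold that increments two counters per character.
import Mathlib
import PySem

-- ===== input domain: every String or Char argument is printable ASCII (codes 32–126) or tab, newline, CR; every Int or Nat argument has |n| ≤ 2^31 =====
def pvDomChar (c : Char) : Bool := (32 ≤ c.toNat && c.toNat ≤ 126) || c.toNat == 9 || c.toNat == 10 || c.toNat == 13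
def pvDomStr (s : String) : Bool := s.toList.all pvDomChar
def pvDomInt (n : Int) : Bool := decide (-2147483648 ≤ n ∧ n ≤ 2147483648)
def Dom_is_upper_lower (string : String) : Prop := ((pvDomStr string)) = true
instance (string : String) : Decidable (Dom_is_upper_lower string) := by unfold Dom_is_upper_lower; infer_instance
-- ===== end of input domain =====

-- B builds a frequency dictionary first and then sums counts per letter range; alternative decomposition, same asymptotic cost.

-- ===== PORT A =====
def is_upper_lower (string : String) : Int × Int :=
  -- state is (lower_case, upper_case), exactly A's two counters
  let st := string.toList.foldl
    (fun (st : Int × Int) i =>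
      if 'A' ≤ i ∧ i ≤ 'Z' then (st.1, st.2 + 1)
      else if 'a' ≤ i ∧ i ≤ 'z' then (st.1 + 1, st.2)
      else st) (0, 0)
  (st.2, st.1)

-- ===== PORT B =====
def is_upper_lower_alt (string : String) : Int × Int :=
  let freq := string.toList.foldl (fun (d : PySem.Dict Char Int) ch => d.insert ch (d.getD ch 0 + 1)) PySem.Dict.empty
  let upper_case := ((freq.items.filter (fun p => decide ('A' ≤ p.1 ∧ p.1 ≤ 'Z'))).map (fun p => p.2)).sum
  let lower_case := ((freq.items.filter (fun p => decide ('a' ≤ p.1 ∧ p.1 ≤ 'z'))).map (fun p => p.2)).sum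
  (upper_case, lower_case)

-- ===== PRECONDITION & SPEC =====
def Spec_is_upper_lower (string : String) (out : Int × Int) : Prop := out = is_upper_lower_alt string
instance (string : String) (out : Int × Int) : Decidable (Spec_is_upper_lower string out) := by unfold Spec_is_upper_lower; infer_instance

-- ===== CLAIM (what is proved, stated in full; the proofs are below) =====
def Claim_equal_is_upper_lower : Prop := ∀ (string : String), Dom_is_upper_lower string → Spec_is_upper_lower string (is_upper_lower string)

-- ===== LEMMAS AND PROOFS =====

-- A's fold counts the two letter ranges
lemma foldA_eq (xs : List Char) : ∀ l u : Int,
    xs.foldl (fun (st : Int × Int) i =>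
      if 'A' ≤ i ∧ i ≤ 'Z' then (st.1, st.2 + 1)
      else if 'a' ≤ i ∧ i ≤ 'z' then (st.1 + 1, st.2)
      else st) (l, u)
    = (l + (xs.countP (fun x => decide ('a' ≤ x ∧ x ≤ 'z')) : Int),
       u + (xs.countP (fun x => decide ('A' ≤ x ∧ x ≤ 'Z')) : Int)) := by
  induction xs with
  | nil => intro l u; simp
  | cons x xs ih =>
    intro l u
    simp only [List.foldl_cons, List.countP_cons]
    by_cases hU : 'A' ≤ x ∧ x ≤ 'Z'
    · have hL : ¬ ('a' ≤ x ∧ x ≤ 'z') := by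
        rintro ⟨h1, _⟩
        exact absurd (le_trans h1 hU.2) (by decide)
      simp [hU, hL, ih]; ring
    · by_cases hL : 'a' ≤ x ∧ x ≤ 'z'
      · simp [hU, hL, ih]; ring
      · simp [hU, hL, ih]

-- over a nodup list M covering nothing in particular: sum of 0/1 indicator of x
lemma sum_indicator (x : Char) (M : List Char) (hnd : M.Nodup) :
    ((M.map (fun k => if x == k then (1 : Int) else 0)).sum) = if x ∈ M then 1 else 0 := by
  induction M with
  | nil => simp
  | cons m M ih =>
    rcases List.nodup_cons.mp hnd with ⟨hm, hnd'⟩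
    simp only [List.map_cons, List.sum_cons, List.mem_cons, ih hnd']
    by_cases hx : x = m
    · subst hx; simp [hm]
    · simp [hx]

-- sum of pointwise addition splits
lemma map_add_sum_eq {α : Type} (f g : α → Int) (L : List α) :
    (L.map (fun k => f k + g k)).sum = (L.map f).sum + (L.map g).sum := by
  induction L with
  | nil => simp
  | cons a L ih => simp [ih]; ring

-- the key lemma: summing counts over a nodup covering key list = countP
lemma sum_counts (p : Char → Bool) (xs : List Char) : ∀ (L : List Char), L.Nodup → (∀ x ∈ xs, x ∈ L) →
    ((L.filter p).map (fun k => (xs.count k : Int))).sum = (xs.countP p : Int) := by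
  induction xs with
  | nil => intro L _ _; simp
  | cons x xs ih =>
    intro L hnd hcov
    have hsplit : ((L.filter p).map (fun k => ((x :: xs).count k : Int)))
        = ((L.filter p).map (fun k => (xs.count k : Int) + (if x == k then 1 else 0))) := by
      apply List.map_congr_left
      intro k _
      rw [List.count_cons]
      push_cast
      ring
    rw [hsplit]
    rw [show (fun k => (xs.count k : Int) + (if x == k then (1:Int) else 0))
        = fun k => ((fun k => (xs.count k : Int)) k + (fun k => if x == k then (1:Int) else 0) k) from rfl]
    rw [map_add_sum_eq]
    · rw [ih L hnd (fun y hy => hcov y (List.mem_cons_of_mem _ hy))]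
      rw [sum_indicator x (L.filter p) (hnd.filter p)]
      have hxL : x ∈ L := hcov x (List.mem_cons_self)
      rw [List.countP_cons]
      by_cases hp : p x
      · simp [List.mem_filter, hxL, hp]
      · simp [List.mem_filter, hp]

-- ===== VERDICT (by name: the statement is the Claim_ definition above) =====
theorem is_upper_lower_spec : Claim_equal_is_upper_lower := by
  intro s _
  unfold Spec_is_upper_lower is_upper_lower is_upper_lower_alt
  simp only [PySem.Dict.foldl_insert_getD_add_one_eq_counter, PySem.Dict.items_counter,
    foldA_eq, List.filter_map, List.map_map]
  have hU := sum_counts (fun x => decide ('A' ≤ x ∧ x ≤ 'Z')) s.toList (PySem.Set.ofList s.toList)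
    (PySem.Set.nodup_ofList _) (fun x hx => (PySem.Set.mem_ofList _ _).mpr hx)
  have hL := sum_counts (fun x => decide ('a' ≤ x ∧ x ≤ 'z')) s.toList (PySem.Set.ofList s.toList)
    (PySem.Set.nodup_ofList _) (fun x hx => (PySem.Set.mem_ofList _ _).mpr hx)
  simp only [Bool.decide_and] at hU hL
  simp [Function.comp_def]
  exact ⟨hU.symm, hL.symm⟩
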